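-- pv_equiv track=rewrite | github.com/dujiahongpashi-lego/ZanOS | filesystem.py | _resort_files
-- ===== SOURCE A (Python) =====
-- def _resort_files(filenames):
--     # By ChatGPT
--     # 创建两个空数组，用于存放含有 . 字符和不含有 . 字符的字符串
--     contains_dot_arr = []
--     not_contains_dot_arr = []
--
--     # 遍历字符串数组，将含有 . 字符和不含有 . 字符的字符串分别添加到对应的数组中
--     for s in filenames:
--         if s == 'System Volume Information':
--             pass
--         elif s.find(".") != -1: # 或者 s.index(".") != -1
--             contains_dot_arr.append(s)
--         else:
--             not_contains_dot_arr.append(s)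
--
--     filenames_list = sorted(not_contains_dot_arr, key=str.lower) + sorted(contains_dot_arr, key=str.lower)
--     files = []
--     for f in filenames_list:
--         files.append({
--             'name': f,
--             'type': ['FOLDER', 'FILE'][f.find(".") != -1],
--             'show_name':['[' + f +']', ' ' + f][f.find(".") != -1]
--         })
--
--     return files
-- ===== SOURCE B (Python) =====
-- def _resort_files(filenames):
--     names = [s for s in filenames if s != 'System Volume Information']
--     names.sort(key=lambda s: ('.' in s, s.lower()))
--     return [{'name': f,
--              'type': 'FILE' if '.' in f else 'FOLDER',
--              'show_name': ' ' + f if '.' in f else '[' + f + ']'}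
--             for f in names]
-- ===== Notes on version B (the rewrite author's own statement) =====
-- stated objective: simpler
-- what changed: Replaces the two-accumulator partition plus two separate sorts and concatenation with a single filter and one stable sort under a composite (has-dot, lowercase) key, building the result with a comprehension.
import Mathlib
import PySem

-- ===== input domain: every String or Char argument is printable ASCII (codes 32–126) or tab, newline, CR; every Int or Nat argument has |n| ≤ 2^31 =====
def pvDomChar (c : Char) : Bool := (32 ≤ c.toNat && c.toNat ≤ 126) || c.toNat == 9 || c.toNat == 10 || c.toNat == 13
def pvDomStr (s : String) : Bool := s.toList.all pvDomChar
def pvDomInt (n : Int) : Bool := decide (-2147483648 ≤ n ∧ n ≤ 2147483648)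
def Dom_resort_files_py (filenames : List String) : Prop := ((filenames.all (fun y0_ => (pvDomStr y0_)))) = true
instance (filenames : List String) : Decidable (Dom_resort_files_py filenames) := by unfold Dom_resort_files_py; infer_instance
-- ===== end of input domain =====

-- B replaces A's two-accumulator partition + two sorts + concatenation by one filter,
-- one stable sort under a composite (has-dot, lowercase) key, and a comprehension (objective: simpler).

-- ===== PORT A =====
-- the partition loop over filenames, returning (contains_dot_arr, not_contains_dot_arr)
def pvPartA (filenames : List String) : List String × List String :=
  filenames.foldl (fun (acc : List String × List String) s =>
      if s = "System Volume Information" then acc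
      else if PySem.Str.find s "." ≠ -1 then (acc.1 ++ [s], acc.2)
      else (acc.1, acc.2 ++ [s])) ([], [])

def resort_files_py (filenames : List String) : List (List (String × String)) :=
  -- filenames_list = sorted(not_contains_dot_arr, key=str.lower) + sorted(contains_dot_arr, key=str.lower)
  -- second loop: files.append({...})
  (PySem.List.sorted (pvPartA filenames).2 (fun s => PySem.Str.lower s) false
     ++ PySem.List.sorted (pvPartA filenames).1 (fun s => PySem.Str.lower s) false).foldl
    (fun acc f =>
      acc ++ [[("name", f),
               ("type", if PySem.Str.find f "." ≠ -1 then "FILE" else "FOLDER"),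
               ("show_name", if PySem.Str.find f "." ≠ -1 then " " ++ f else "[" ++ f ++ "]")]]) []

-- ===== PORT B =====
def resort_files_py_alt (filenames : List String) : List (List (String × String)) :=
  (PySem.List.sorted2 (filenames.filter (fun s => decide (s ≠ "System Volume Information")))
      (fun s => PySem.Str.isIn "." s) (fun s => PySem.Str.lower s) false).map (fun f =>
      [("name", f),
       ("type", if PySem.Str.isIn "." f then "FILE" else "FOLDER"),
       ("show_name", if PySem.Str.isIn "." f then " " ++ f else "[" ++ f ++ "]")])

-- ===== PRECONDITION & SPEC =====
def Spec_resort_files_py (filenames : List String) (out : List (List (String × String))) : Prop := out = resort_files_py_alt filenames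
instance (filenames : List String) (out : List (List (String × String))) : Decidable (Spec_resort_files_py filenames out) := by unfold Spec_resort_files_py; infer_instance

-- ===== CLAIM (what is proved, stated in full; the proofs are below) =====
def Claim_equal_resort_files_py : Prop := ∀ (filenames : List String), Dom_resort_files_py filenames → Spec_resort_files_py filenames (resort_files_py filenames)

-- ===== LEMMAS AND PROOFS =====

-- the composite lexicographic comparison sorted2 uses, for a Bool first key
def pvLex {α : Type} (k1 : α → Bool) (k2 : α → String) (a b : α) : Bool :=
  decide (k1 a < k1 b) || !decide (k1 b < k1 a) && decide (k2 a < k2 b)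

def pvLt2 {α : Type} (k2 : α → String) (a b : α) : Bool := decide (k2 a < k2 b)

-- inserting into a (false-flag block ++ true-flag block) list lands in the right block
lemma pv_insert_split {α : Type} (k1 : α → Bool) (k2 : α → String) (x : α) :
    ∀ (L R : List α), (∀ y ∈ L, k1 y = false) → (∀ y ∈ R, k1 y = true) →
    PySem.List.insertBy (pvLex k1 k2) x (L ++ R)
      = if k1 x then L ++ PySem.List.insertBy (pvLt2 k2) x R
        else PySem.List.insertBy (pvLt2 k2) x L ++ R := by
  intro L R hL hR
  induction L with
  | nil =>
    simp only [List.nil_append]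
    by_cases hx : k1 x
    · -- walk through R with lex = lt2
      simp only [hx, if_pos]
      induction R with
      | nil => simp [PySem.List.insertBy]
      | cons r rs ih =>
        have hr : k1 r = true := hR r (by simp)
        have hlex : pvLex k1 k2 x r = pvLt2 k2 x r := by
          simp [pvLex, pvLt2, hx, hr]
        simp only [PySem.List.insertBy, hlex]
        by_cases h2 : pvLt2 k2 x r
        · simp [h2]
        · simp only [h2, Bool.false_eq_true, if_false]
          rw [ih (fun y hy => hR y (by simp [hy]))]
    · -- x goes before all of R
      have hx' : k1 x = false := by simpa using hx
      simp only [hx, Bool.false_eq_true, if_false]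
      cases R with
      | nil => simp [PySem.List.insertBy]
      | cons r rs =>
        have hr : k1 r = true := hR r (by simp)
        have hlex : pvLex k1 k2 x r = true := by
          simp [pvLex, hx', hr]
        simp [PySem.List.insertBy, hlex]
  | cons l ls ih =>
    have hl : k1 l = false := hL l (by simp)
    by_cases hx : k1 x
    · have hlex : pvLex k1 k2 x l = false := by
        simp [pvLex, hx, hl]
      simp only [List.cons_append, PySem.List.insertBy, hlex, Bool.false_eq_true, if_false, hx,
        if_pos]
      rw [ih (fun y hy => hL y (by simp [hy]))]
      simp [hx]
    · have hx' : k1 x = false := by simpa using hx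
      have hlex : pvLex k1 k2 x l = pvLt2 k2 x l := by
        simp [pvLex, pvLt2, hx', hl]
      simp only [List.cons_append, PySem.List.insertBy, hlex, hx, Bool.false_eq_true, if_false]
      by_cases h2 : pvLt2 k2 x l
      · simp [h2]
      · simp only [h2, Bool.false_eq_true, if_false]
        rw [ih (fun y hy => hL y (by simp [hy]))]
        simp [hx]

-- the whole insertion-sort fold splits into the two blocks
lemma pv_fold_split {α : Type} (k1 : α → Bool) (k2 : α → String) :
    ∀ (xs L R : List α), (∀ y ∈ L, k1 y = false) → (∀ y ∈ R, k1 y = true) →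
    xs.foldl (fun acc x => PySem.List.insertBy (pvLex k1 k2) x acc) (L ++ R)
      = (xs.filter (fun x => !k1 x)).foldl (fun acc x => PySem.List.insertBy (pvLt2 k2) x acc) L
        ++ (xs.filter k1).foldl (fun acc x => PySem.List.insertBy (pvLt2 k2) x acc) R := by
  intro xs
  induction xs with
  | nil => intro L R _ _; simp
  | cons x t ih =>
    intro L R hL hR
    simp only [List.foldl_cons, List.filter_cons]
    rw [pv_insert_split k1 k2 x L R hL hR]
    by_cases hx : k1 x
    · have hR' : ∀ y ∈ PySem.List.insertBy (pvLt2 k2) x R, k1 y = true := by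
        intro y hy
        rcases (PySem.List.mem_insertBy _ _ _ _).mp hy with h | h
        · rw [h]; exact hx
        · exact hR y h
      simp only [hx, if_pos, Bool.not_true, Bool.false_eq_true, if_false]
      rw [ih L _ hL hR', List.foldl_cons]
    · have hx' : k1 x = false := by simpa using hx
      have hL' : ∀ y ∈ PySem.List.insertBy (pvLt2 k2) x L, k1 y = false := by
        intro y hy
        rcases (PySem.List.mem_insertBy _ _ _ _).mp hy with h | h
        · rw [h]; exact hx'
        · exact hL y h
      simp only [hx', Bool.not_false, if_pos, Bool.false_eq_true, if_false]
      rw [ih _ R hL' hR, List.foldl_cons]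

-- sorted2 with a Bool first key = sorted(false part) ++ sorted(true part)
lemma pv_sorted2_split {α : Type} (k1 : α → Bool) (k2 : α → String) (xs : List α) :
    PySem.List.sorted2 xs k1 k2 false
      = PySem.List.sorted (xs.filter (fun x => !k1 x)) k2 false
        ++ PySem.List.sorted (xs.filter k1) k2 false := by
  exact pv_fold_split k1 k2 xs [] [] (by simp) (by simp)

-- A's partition loop computes two filters
lemma pv_part (xs : List String) : ∀ (cd ncd : List String),
    xs.foldl (fun (acc : List String × List String) s =>
      if s = "System Volume Information" then acc
      else if PySem.Str.find s "." ≠ -1 then (acc.1 ++ [s], acc.2)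
      else (acc.1, acc.2 ++ [s])) (cd, ncd)
    = (cd ++ xs.filter (fun s => decide (s ≠ "System Volume Information") && PySem.Str.isIn "." s),
       ncd ++ xs.filter (fun s => decide (s ≠ "System Volume Information") && !PySem.Str.isIn "." s)) := by
  induction xs with
  | nil => intro cd ncd; simp
  | cons x t ih =>
    intro cd ncd
    have hin : (PySem.Str.find x "." ≠ -1) ↔ PySem.Str.isIn "." x = true := by
      rw [PySem.Str.find_ne_neg_one_iff, PySem.Str.isIn_iff_infix]
    simp only [List.foldl_cons]
    by_cases hs : x = "System Volume Information"
    · rw [if_pos hs, ih]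
      simp [hs]
    · rw [if_neg hs]
      by_cases hd : PySem.Str.find x "." ≠ -1
      · have hi : PySem.Str.isIn "." x = true := hin.mp hd
        have hi' : PySem.Chars.isIn ['.'] x.toList = true := by simpa using hi
        rw [if_pos hd, ih]
        simp [hs, hi']
      · have hi : PySem.Str.isIn "." x = false := by
          cases h : PySem.Str.isIn "." x
          · rfl
          · exact absurd (hin.mpr h) hd
        have hi' : PySem.Chars.isIn ['.'] x.toList = false := by simpa using hi
        rw [if_neg hd, ih]
        simp [hs, hi']

-- ===== VERDICT (by name: the statement is the Claim_ definition above) =====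
theorem resort_files_py_spec : Claim_equal_resort_files_py := by
  intro filenames _
  unfold Spec_resort_files_py resort_files_py resort_files_py_alt
  rw [pv_sorted2_split]
  unfold pvPartA
  rw [pv_part filenames [] []]
  simp only [List.nil_append, List.filter_filter]
  rw [PySem.List.foldl_append_singleton_eq_map]
  simp only [List.nil_append]
  have hfilt1 : ∀ (x : String),
      (!PySem.Str.isIn "." x && decide (x ≠ "System Volume Information"))
      = (decide (x ≠ "System Volume Information") && !PySem.Str.isIn "." x) := by
    intro x; exact Bool.and_comm _ _
  have hfilt2 : ∀ (x : String),
      (PySem.Str.isIn "." x && decide (x ≠ "System Volume Information"))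
      = (decide (x ≠ "System Volume Information") && PySem.Str.isIn "." x) := by
    intro x; exact Bool.and_comm _ _
  simp only [hfilt1, hfilt2]
  apply List.map_congr_left
  intro f _
  have hin : (PySem.Str.find f "." ≠ -1) ↔ PySem.Str.isIn "." f = true := by
    rw [PySem.Str.find_ne_neg_one_iff, PySem.Str.isIn_iff_infix]
  cases h : PySem.Str.isIn "." f
  · have h2 : PySem.Chars.isIn ['.'] f.toList = false := by simpa using h
    have h' : PySem.Chars.find f.toList ['.'] = -1 := by
      have h3 : PySem.Str.find f "." = -1 := by
        rw [PySem.Str.find_eq_neg_one_iff]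
        exact (PySem.Chars.isIn_eq_false_iff ['.'] f.toList).mp h2
      simpa using h3
    simp [h']
  · have h2 : PySem.Chars.isIn ['.'] f.toList = true := by simpa using h
    have h' : PySem.Chars.find f.toList ['.'] ≠ -1 := by
      have h3 : PySem.Str.find f "." ≠ -1 := by
        rw [PySem.Str.find_ne_neg_one_iff]
        exact (PySem.Chars.isIn_iff_infix ['.'] f.toList).mp h2
      simpa using h3
    simp [h']
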